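-- pv_equiv track=rewrite | github.com/benyG/ExbootGen | handsonlab.py | _map_step_types
-- ===== SOURCE A (Python) =====
-- from typing import Dict, Iterable, List, Mapping
--
-- def _map_step_types(analysis: Dict[str, str]) -> Dict[str, str]:
--     scenario_to_steps = {
--         "case": ["quiz", "inspect_file"],
--         "archi": ["architecture"],
--         "config": ["terminal", "console_form"],
--         "console": ["terminal", "console_form"],
--         "code": ["terminal", "inspect_file"],
--     }
--     step_flags = {key: "0" for key in ["quiz", "architecture", "terminal", "console_form", "inspect_file"]}
--     for scenario, steps in scenario_to_steps.items():
--         if analysis.get(scenario) == "1":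
--             for step in steps:
--                 step_flags[step] = "1"
--     if not any(flag == "1" for flag in step_flags.values()):
--         # Always allow quiz as fallback so the prompt stays consistent.
--         step_flags["quiz"] = "1"
--     return step_flags
-- ===== SOURCE B (Python) =====
-- def _map_step_types(analysis):
--     case = analysis.get("case") == "1"
--     archi = analysis.get("archi") == "1"
--     config = analysis.get("config") == "1"
--     console = analysis.get("console") == "1"
--     code = analysis.get("code") == "1"
--     none_active = not (case or archi or config or console or code)
--     return {
--         "quiz": "1" if case or none_active else "0",
--         "architecture": "1" if archi else "0",
--         "terminal": "1" if config or console or code else "0",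
--         "console_form": "1" if config or console else "0",
--         "inspect_file": "1" if case or code else "0",
--     }
-- ===== Notes on version B (the rewrite author's own statement) =====
-- stated objective: simpler
-- what changed: Replaces the table-driven loop over a scenario-to-steps mapping and the post-hoc any() fallback with straight-line code: five boolean scenario lookups combined by closed-form boolean formulas per step, with the quiz fallback folded into quiz's own formula (no tables, no loops, no mutation).
import Mathlib
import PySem

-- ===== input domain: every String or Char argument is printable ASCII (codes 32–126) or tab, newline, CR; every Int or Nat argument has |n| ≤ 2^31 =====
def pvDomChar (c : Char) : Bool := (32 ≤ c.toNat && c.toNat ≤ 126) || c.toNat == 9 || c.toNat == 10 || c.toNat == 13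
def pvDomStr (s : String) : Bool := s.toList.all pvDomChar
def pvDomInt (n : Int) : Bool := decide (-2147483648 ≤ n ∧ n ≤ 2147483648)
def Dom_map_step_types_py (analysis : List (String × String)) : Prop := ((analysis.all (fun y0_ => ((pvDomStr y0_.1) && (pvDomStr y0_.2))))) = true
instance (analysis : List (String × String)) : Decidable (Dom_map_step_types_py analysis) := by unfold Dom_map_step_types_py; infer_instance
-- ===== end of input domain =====

-- B replaces A's table-driven loop and any() fallback with straight-line boolean formulas per step (simpler; same cost).

-- ===== PORT A =====
def map_step_types_py (analysis : List (String × String)) : List (String × String) :=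
  let a : PySem.Dict String String := PySem.Dict.mk analysis
  let scenario_to_steps : List (String × List String) :=
    [("case", ["quiz", "inspect_file"]),
     ("archi", ["architecture"]),
     ("config", ["terminal", "console_form"]),
     ("console", ["terminal", "console_form"]),
     ("code", ["terminal", "inspect_file"])]
  let step_flags : PySem.Dict String String :=
    ["quiz", "architecture", "terminal", "console_form", "inspect_file"].foldl
      (fun d k => d.insert k "0") PySem.Dict.empty
  let step_flags := scenario_to_steps.foldl
    (fun sf p =>
      if a.get? p.1 == some "1" then
        p.2.foldl (fun sf step => sf.insert step "1") sf
      else sf)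
    step_flags
  let step_flags :=
    if !(step_flags.values.any (fun flag => flag == "1")) then
      step_flags.insert "quiz" "1"
    else step_flags
  step_flags.items

-- ===== PORT B =====
def map_step_types_py_alt (analysis : List (String × String)) : List (String × String) :=
  let a : PySem.Dict String String := PySem.Dict.mk analysis
  let case : Bool := a.get? "case" == some "1"
  let archi : Bool := a.get? "archi" == some "1"
  let config : Bool := a.get? "config" == some "1"
  let console : Bool := a.get? "console" == some "1"
  let code : Bool := a.get? "code" == some "1"
  let none_active : Bool := !(case || archi || config || console || code)
  [("quiz", if case || none_active then "1" else "0"),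
   ("architecture", if archi then "1" else "0"),
   ("terminal", if config || console || code then "1" else "0"),
   ("console_form", if config || console then "1" else "0"),
   ("inspect_file", if case || code then "1" else "0")]

-- ===== PRECONDITION & SPEC =====
def Spec_map_step_types_py (analysis : List (String × String)) (out : List (String × String)) : Prop := out = map_step_types_py_alt analysis
instance (analysis : List (String × String)) (out : List (String × String)) : Decidable (Spec_map_step_types_py analysis out) := by unfold Spec_map_step_types_py; infer_instance

-- ===== CLAIM (what is proved, stated in full; the proofs are below) =====
def Claim_equal_map_step_types_py : Prop := ∀ (analysis : List (String × String)), Dom_map_step_types_py analysis → Spec_map_step_types_py analysis (map_step_types_py analysis)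

-- ===== LEMMAS AND PROOFS =====

theorem map_step_types_ab (analysis : List (String × String)) :
    map_step_types_py analysis = map_step_types_py_alt analysis := by
  unfold map_step_types_py map_step_types_py_alt
  by_cases h1 : (PySem.Dict.mk analysis).get? "case" = some "1" <;>
  by_cases h2 : (PySem.Dict.mk analysis).get? "archi" = some "1" <;>
  by_cases h3 : (PySem.Dict.mk analysis).get? "config" = some "1" <;>
  by_cases h4 : (PySem.Dict.mk analysis).get? "console" = some "1" <;>
  by_cases h5 : (PySem.Dict.mk analysis).get? "code" = some "1" <;>
  simp [h1, h2, h3, h4, h5] <;> decide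

-- ===== VERDICT (by name: the statement is the Claim_ definition above) =====
theorem map_step_types_py_spec : Claim_equal_map_step_types_py := by
  intro analysis _
  unfold Spec_map_step_types_py
  exact map_step_types_ab analysis
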